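-- pv_equiv track=rewrite | github.com/SteveWillowby/Order_and_Chaos | old_code/plot_some_graph_structure.py | __triangles_sequence_with_all_nodes_always__
-- ===== SOURCE A (Python) =====
-- def __triangles_sequence_with_all_nodes_always__(sequence_length):
--     sequence = []
--     nodes_list = []
--     edges_list = []
--     for i in range(0, sequence_length):
--         nodes_list.append(i*3)
--         nodes_list.append(i*3 + 1)
--         nodes_list.append(i*3 + 2)
--         edges_list.append((i*3, i*3 + 1))
--         edges_list.append((i*3 + 1, i*3 + 2))
--         edges_list.append((i*3 + 2, i*3))
--         sequence.append((nodes_list, list(edges_list)))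
--     return sequence
-- ===== SOURCE B (Python) =====
-- def __triangles_sequence_with_all_nodes_always__(sequence_length):
--     nodes = list(range(3 * sequence_length))
--     return [(nodes,
--              [e for k in range(i + 1)
--                 for e in ((3 * k, 3 * k + 1),
--                           (3 * k + 1, 3 * k + 2),
--                           (3 * k + 2, 3 * k))])
--             for i in range(sequence_length)]
-- ===== Notes on version B (the rewrite author's own statement) =====
-- stated objective: alternative
-- what changed: Replaces A's stateful grow-and-copy loop (two mutated accumulator lists and a snapshot copy per step) by a stateless comprehension: the node list is built once as list(range(3*n)) and shared, and each snapshot's edge list is computed independently in closed form as the triangle edges for k in 0..i, with no accumulators, copying or slicing.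
import Mathlib
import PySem

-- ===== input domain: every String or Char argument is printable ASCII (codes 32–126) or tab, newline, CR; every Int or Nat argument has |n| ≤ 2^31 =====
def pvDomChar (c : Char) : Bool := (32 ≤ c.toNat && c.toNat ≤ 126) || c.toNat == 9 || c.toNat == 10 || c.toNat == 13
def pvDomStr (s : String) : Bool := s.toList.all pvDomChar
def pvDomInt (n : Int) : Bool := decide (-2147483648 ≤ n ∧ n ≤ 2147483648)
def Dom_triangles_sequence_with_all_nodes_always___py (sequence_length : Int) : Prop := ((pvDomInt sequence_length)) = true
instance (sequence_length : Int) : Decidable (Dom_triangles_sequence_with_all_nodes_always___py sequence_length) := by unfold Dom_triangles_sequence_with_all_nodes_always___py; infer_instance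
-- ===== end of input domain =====

-- B replaces A's stateful grow-and-copy loop by a stateless nested comprehension computing each snapshot independently (alternative decomposition, same cost).
-- Python's returned tuples all reference the single mutated nodes_list; both ports model that
-- returned VALUE by pairing the full node list with each edges snapshot.


-- ===== PORT A =====
-- A's loop mutates nodes_list/edges_list and appends (nodes_list, list(edges_list));
-- since every tuple shares the one nodes_list object, the returned value pairs the
-- FINAL node list with each edges snapshot (exact model of the returned value).
def triangles_sequence_with_all_nodes_always___py (sequence_length : Int) : List (List Int × (List (Int × Int))) :=
  let st := (PySem.List.pyRange 0 sequence_length 1).foldl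
    (fun (s : List Int × List (Int × Int) × List (List (Int × Int))) i =>
      (s.1 ++ [i*3, i*3 + 1, i*3 + 2],
       s.2.1 ++ [(i*3, i*3 + 1), (i*3 + 1, i*3 + 2), (i*3 + 2, i*3)],
       s.2.2 ++ [s.2.1 ++ [(i*3, i*3 + 1), (i*3 + 1, i*3 + 2), (i*3 + 2, i*3)]]))
    ([], [], [])
  st.2.2.map (fun es => (st.1, es))

-- ===== PORT B =====
-- stateless nested comprehension: snapshot i built independently in closed form
def triangles_sequence_with_all_nodes_always___py_alt (sequence_length : Int) : List (List Int × (List (Int × Int))) :=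
  let nodes := PySem.List.pyRange 0 (3 * sequence_length) 1
  (PySem.List.pyRange 0 sequence_length 1).map
    (fun i =>
      (nodes,
       (PySem.List.pyRange 0 (i + 1) 1).flatMap
         (fun k => [(3*k, 3*k + 1), (3*k + 1, 3*k + 2), (3*k + 2, 3*k)])))

-- ===== PRECONDITION & SPEC =====
def Spec_triangles_sequence_with_all_nodes_always___py (sequence_length : Int) (out : List (List Int × (List (Int × Int)))) : Prop := out = triangles_sequence_with_all_nodes_always___py_alt sequence_length
instance (sequence_length : Int) (out : List (List Int × (List (Int × Int)))) : Decidable (Spec_triangles_sequence_with_all_nodes_always___py sequence_length out) := by unfold Spec_triangles_sequence_with_all_nodes_always___py; infer_instance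

-- ===== CLAIM (what is proved, stated in full; the proofs are below) =====
def Claim_equal_triangles_sequence_with_all_nodes_always___py : Prop := ∀ (sequence_length : Int), Dom_triangles_sequence_with_all_nodes_always___py sequence_length → Spec_triangles_sequence_with_all_nodes_always___py sequence_length (triangles_sequence_with_all_nodes_always___py sequence_length)

-- ===== LEMMAS AND PROOFS =====

-- closed forms used by the proofs only
def pvEdg (i : Int) : List (Int × Int) := [(3*i, 3*i + 1), (3*i + 1, 3*i + 2), (3*i + 2, 3*i)]
def pvE (m : Nat) : List (Int × Int) := (List.range m).flatMap (fun (k : Nat) => pvEdg (k : Int))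
def pvN (m : Nat) : List Int := (List.range m).map (fun (k : Nat) => (k : Int))

theorem pvE_succ (m : Nat) : pvE (m + 1) = pvE m ++ pvEdg (m : Int) := by
  simp [pvE, List.range_succ]

theorem pv_foldA (m : Nat) :
    ((List.range m).map (fun (k : Nat) => (k : Int))).foldl
      (fun (s : List Int × List (Int × Int) × List (List (Int × Int))) i =>
        (s.1 ++ [i*3, i*3 + 1, i*3 + 2],
         s.2.1 ++ [(i*3, i*3 + 1), (i*3 + 1, i*3 + 2), (i*3 + 2, i*3)],
         s.2.2 ++ [s.2.1 ++ [(i*3, i*3 + 1), (i*3 + 1, i*3 + 2), (i*3 + 2, i*3)]]))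
      ([], [], [])
    = (pvN (3 * m), pvE m, (List.range m).map (fun j => pvE (j + 1))) := by
  induction m with
  | zero => simp [pvN, pvE]
  | succ m ih =>
    rw [List.range_succ, List.map_append, List.foldl_append, ih]
    simp only [List.map_cons, List.map_nil, List.foldl_cons, List.foldl_nil, Prod.mk.injEq]
    refine ⟨?_, ?_, ?_⟩
    · have h3 : 3 * (m + 1) = 3 * m + 1 + 1 + 1 := by ring
      simp [pvN, h3, List.range_succ]
      omega
    · rw [pvE_succ]
      simp [pvEdg]
      omega
    · simp [pvE_succ, pvEdg]
      omega

theorem pv_range_cast (n : Int) (hn : 0 ≤ n) :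
    PySem.List.pyRange 0 n 1 = (List.range n.toNat).map (fun (k : Nat) => (k : Int)) := by
  rw [PySem.List.pyRange_one]
  simp only [sub_zero, zero_add]

-- ===== VERDICT (by name: the statement is the Claim_ definition above) =====
theorem triangles_sequence_with_all_nodes_always___py_spec : Claim_equal_triangles_sequence_with_all_nodes_always___py := by
  intro n _
  show triangles_sequence_with_all_nodes_always___py n = triangles_sequence_with_all_nodes_always___py_alt n
  unfold triangles_sequence_with_all_nodes_always___py triangles_sequence_with_all_nodes_always___py_alt
  by_cases hn : n ≤ 0
  · rw [PySem.List.pyRange_one_eq_nil hn]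
    simp
  · have h0 : (0:Int) ≤ n := by omega
    rw [pv_range_cast n h0, pv_foldA]
    have h3 : PySem.List.pyRange 0 (3 * n) 1 = pvN (3 * n.toNat) := by
      rw [pv_range_cast (3 * n) (by omega), show (3 * n).toNat = 3 * n.toNat from by omega]
      rfl
    rw [h3]
    simp only [List.map_map]
    apply List.map_congr_left
    intro j _
    show (pvN (3 * n.toNat), pvE (j + 1)) =
      (pvN (3 * n.toNat),
        (PySem.List.pyRange 0 ((j : Int) + 1) 1).flatMap
          (fun k => [(3*k, 3*k + 1), (3*k + 1, 3*k + 2), (3*k + 2, 3*k)]))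
    have hr : PySem.List.pyRange 0 ((j : Int) + 1) 1
        = (List.range (j + 1)).map (fun (k : Nat) => (k : Int)) := by
      rw [pv_range_cast ((j : Int) + 1) (by positivity),
        show ((j : Int) + 1).toNat = j + 1 from by omega]
    rw [hr, List.flatMap_map]
    rfl
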